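-- pv_equiv track=rewrite | github.com/dholman7/danholman-portfolio | scripts/validation/issue_fixer.py | _fix_deprecated_actions
-- ===== SOURCE A (Python) =====
-- def _fix_deprecated_actions(content: str) -> str:
--     """Fix deprecated GitHub Actions."""
--     replacements = {
--         "actions/checkout@v2": "actions/checkout@v4",
--         "actions/setup-python@v2": "actions/setup-python@v5",
--         "actions/setup-node@v2": "actions/setup-node@v4"
--     }
--
--     for old_action, new_action in replacements.items():
--         content = content.replace(old_action, new_action)
--
--     return content
-- ===== SOURCE B (Python) =====
-- def _fix_deprecated_actions(content: str) -> str: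
--     """Fix deprecated GitHub Actions (single left-to-right scan)."""
--     mapping = (("actions/checkout@v2", "actions/checkout@v4"),
--                ("actions/setup-python@v2", "actions/setup-python@v5"),
--                ("actions/setup-node@v2", "actions/setup-node@v4"))
--     out = []
--     i = 0
--     n = len(content)
--     while i < n:
--         for old_action, new_action in mapping:
--             if content.startswith(old_action, i):
--                 out.append(new_action)
--                 i += len(old_action)
--                 break
--         else:
--             out.append(content[i])
--             i += 1
--     return "".join(out)
-- ===== Notes on version B (the rewrite author's own statement) =====
-- stated objective: alternative
-- what changed: Replaces three sequential full-string .replace passes by a single left-to-right scan that matches any of the three deprecated action names in place and copies other characters through, building the output once.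
import Mathlib
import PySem

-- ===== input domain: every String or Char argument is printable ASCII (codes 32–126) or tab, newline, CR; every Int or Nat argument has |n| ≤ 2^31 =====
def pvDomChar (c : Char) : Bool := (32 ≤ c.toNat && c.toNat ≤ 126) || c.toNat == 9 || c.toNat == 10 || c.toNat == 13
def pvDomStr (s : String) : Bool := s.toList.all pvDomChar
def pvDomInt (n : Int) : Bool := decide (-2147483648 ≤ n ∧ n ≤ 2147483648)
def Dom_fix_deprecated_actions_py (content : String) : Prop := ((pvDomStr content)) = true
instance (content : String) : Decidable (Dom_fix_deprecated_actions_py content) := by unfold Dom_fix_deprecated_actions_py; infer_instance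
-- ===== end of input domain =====

-- B replaces A's three sequential full-string .replace passes by one left-to-right scan
-- that substitutes whichever deprecated action name matches at the current position
-- (objective: alternative — a single pass instead of three).

-- ===== PORT A =====
def fix_deprecated_actions_py (content : String) : String :=
  -- the dict literal `replacements`
  let replacements : PySem.Dict String String :=
    PySem.Dict.ofList
      [("actions/checkout@v2", "actions/checkout@v4"),
       ("actions/setup-python@v2", "actions/setup-python@v5"),
       ("actions/setup-node@v2", "actions/setup-node@v4")]
  -- for old_action, new_action in replacements.items(): content = content.replace(old, new)
  replacements.items.foldl (fun c pr => PySem.Str.replace c pr.1 pr.2) content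

-- ===== PORT B =====
-- the three mapping entries, as char lists (Source B's dict, iterated in insertion order)
def pvP1 : List Char := "actions/checkout@v2".toList
def pvR1 : List Char := "actions/checkout@v4".toList
def pvP2 : List Char := "actions/setup-python@v2".toList
def pvR2 : List Char := "actions/setup-python@v5".toList
def pvP3 : List Char := "actions/setup-node@v2".toList
def pvR3 : List Char := "actions/setup-node@v4".toList

-- termination facts for the scan, cited by name in `decreasing_by`
theorem pvDropLt (pat l : List Char) (h : pat <+: l) (hp : pat ≠ []) :
    (l.drop pat.length).length < l.length := by
  have h1 := h.length_le
  have h2 : 0 < pat.length := List.length_pos_iff.mpr hp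
  simp only [List.length_drop]
  omega

theorem pvConsLt (c : Char) (t : List Char) : t.length < (c :: t).length :=
  Nat.lt_succ_self _

-- Source B's while loop: at each position try the three patterns in order (the inner
-- `for … break/else` unrolled over the literal mapping); on a match emit the
-- replacement and jump past the pattern, otherwise emit the character and advance by one.
def pvScan (l : List Char) : List Char :=
  if h1 : pvP1 <+: l then pvR1 ++ pvScan (l.drop pvP1.length)
  else if h2 : pvP2 <+: l then pvR2 ++ pvScan (l.drop pvP2.length)
  else if h3 : pvP3 <+: l then pvR3 ++ pvScan (l.drop pvP3.length)
  else match l with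
    | [] => []
    | c :: t => c :: pvScan t
termination_by l.length
decreasing_by
  · exact pvDropLt pvP1 l h1 (by decide)
  · exact pvDropLt pvP2 l h2 (by decide)
  · exact pvDropLt pvP3 l h3 (by decide)
  · exact pvConsLt c t

def fix_deprecated_actions_py_alt (content : String) : String :=
  String.ofList (pvScan content.toList)

-- ===== PRECONDITION & SPEC =====
def Spec_fix_deprecated_actions_py (content : String) (out : String) : Prop := out = fix_deprecated_actions_py_alt content
instance (content : String) (out : String) : Decidable (Spec_fix_deprecated_actions_py content out) := by unfold Spec_fix_deprecated_actions_py; infer_instance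

-- ===== CLAIM (what is proved, stated in full; the proofs are below) =====
def Claim_equal_fix_deprecated_actions_py : Prop := ∀ (content : String), Dom_fix_deprecated_actions_py content → Spec_fix_deprecated_actions_py content (fix_deprecated_actions_py content)

-- ===== LEMMAS AND PROOFS =====

-- clean recursion computing Python's s.replace(old, new) for old ≠ [] (proved equal to
-- PySem.Chars.replace below); all reasoning about A's three passes is done on this form
def pvRepl (old new : List Char) (l : List Char) : List Char :=
  if h : old ≠ [] ∧ old <+: l then new ++ pvRepl old new (l.drop old.length)
  else match l with
    | [] => []
    | c :: t => c :: pvRepl old new t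
termination_by l.length
decreasing_by
  · exact pvDropLt old l h.2 h.1
  · exact pvConsLt c t

theorem pvRepl_nil (old new : List Char) : pvRepl old new [] = [] := by
  rw [pvRepl]
  rw [dif_neg (by simp)]

theorem pvRepl_step (old new l : List Char) (hold : old ≠ []) (h : old <+: l) :
    pvRepl old new l = new ++ pvRepl old new (l.drop old.length) := by
  rw [pvRepl, dif_pos ⟨hold, h⟩]

theorem pvRepl_match (old new : List Char) (hold : old ≠ []) (t : List Char) :
    pvRepl old new (old ++ t) = new ++ pvRepl old new t := by
  rw [pvRepl_step old new (old ++ t) hold (List.prefix_append _ _), List.drop_left]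

theorem pvRepl_skip (old new : List Char) (c : Char) (t : List Char)
    (h : ¬ old <+: (c :: t)) : pvRepl old new (c :: t) = c :: pvRepl old new t := by
  rw [pvRepl, dif_neg (by tauto)]

theorem pvGo_spec (old new : List Char) (hold : old ≠ []) :
    ∀ (fuel : Nat) (l acc : List Char), l.length ≤ fuel →
      PySem.Chars.replace.go old new fuel l acc = acc.reverse ++ pvRepl old new l := by
  intro fuel
  induction fuel with
  | zero =>
    intro l acc hl
    have : l = [] := by cases l <;> simp_all
    subst this
    simp [PySem.Chars.replace.go, pvRepl_nil]
  | succ n ih =>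
    intro l acc hl
    cases l with
    | nil => simp [PySem.Chars.replace.go, pvRepl_nil]
    | cons c t =>
      by_cases hb : old <+: (c :: t)
      · have hbb : old.isPrefixOf (c :: t) = true := by
          rw [List.isPrefixOf_iff_prefix]; exact hb
        have hlen : (List.drop old.length (c :: t)).length ≤ n := by
          have h0 : 0 < old.length := List.length_pos_iff.mpr hold
          simp only [List.length_drop, List.length_cons]
          simp only [List.length_cons] at hl
          omega
        simp only [PySem.Chars.replace.go, hbb, if_true]
        rw [ih _ _ hlen]
        rw [pvRepl_step old new (c :: t) hold hb]
        simp
      · have hbb : old.isPrefixOf (c :: t) = false := by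
          rw [Bool.eq_false_iff, ne_eq, List.isPrefixOf_iff_prefix]; exact hb
        have hlen : t.length ≤ n := by
          simp only [List.length_cons] at hl; omega
        simp only [PySem.Chars.replace.go, hbb]
        rw [ih _ _ hlen, pvRepl_skip old new c t hb]
        simp

theorem pvReplace_eq (old new s : List Char) (hold : old ≠ []) :
    PySem.Chars.replace s old new = pvRepl old new s := by
  unfold PySem.Chars.replace
  rw [if_neg (by simp [hold])]
  rw [pvGo_spec old new hold s.length s [] (le_refl _)]
  simp

-- a block b that contains no start of a match of `old` (no nonempty suffix of b is
-- prefix-comparable with old) passes unchanged through pvRepl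
theorem pvRepl_pass (old new : List Char) :
    ∀ (b : List Char), (∀ x ∈ b.tails, x ≠ [] → ¬ old <+: x ∧ ¬ x <+: old) →
      ∀ w, pvRepl old new (b ++ w) = b ++ pvRepl old new w := by
  intro b
  induction b with
  | nil => simp
  | cons c b' ih =>
    intro hC w
    have hself := hC (c :: b') ((List.mem_tails _ _).mpr (List.suffix_refl _)) (by simp)
    have hnp : ¬ old <+: (c :: (b' ++ w)) := by
      intro hp
      rcases List.prefix_or_prefix_of_prefix hp
          (show (c :: b') <+: (c :: b') ++ w from List.prefix_append _ _) with h | h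
      · exact hself.1 h
      · exact hself.2 h
    rw [List.cons_append, pvRepl_skip old new c (b' ++ w) hnp]
    rw [ih (fun x hx hxne => hC x
      ((List.mem_tails _ _).mpr (((List.mem_tails _ _).mp hx).trans (List.suffix_cons c b'))) hxne) w]
    rfl

-- pvRepl never CREATES an occurrence of p at the front: if a nonempty suffix x of p is
-- a prefix of the output, it was a prefix of the input (needs: no nonempty suffix of p
-- is prefix-comparable with the replacement `new`)
theorem pvRepl_noCreate (old new p : List Char) (hold : old ≠ [])
    (hD : ∀ x ∈ p.tails, x ≠ [] → ¬ x <+: new ∧ ¬ new <+: x) :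
    ∀ (u x : List Char), x <:+ p → x ≠ [] → x <+: pvRepl old new u → x <+: u := by
  have H : ∀ (n : Nat) (u : List Char), u.length ≤ n → ∀ (x : List Char),
      x <:+ p → x ≠ [] → x <+: pvRepl old new u → x <+: u := by
    intro n
    induction n with
    | zero =>
      intro u hu x _ hxne hpref
      have : u = [] := by cases u <;> simp_all
      subst this
      rw [pvRepl_nil] at hpref
      exact absurd (List.prefix_nil.mp hpref) hxne
    | succ n ih =>
      intro u hu x hsx hxne hpref
      by_cases hm : old <+: u
      · obtain ⟨t, rfl⟩ := hm
        rw [pvRepl_match old new hold t] at hpref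
        have hDx := hD x ((List.mem_tails _ _).mpr hsx) hxne
        rcases List.prefix_or_prefix_of_prefix hpref
            (show new <+: new ++ pvRepl old new t from List.prefix_append _ _) with h | h
        · exact absurd h hDx.1
        · exact absurd h hDx.2
      · cases u with
        | nil =>
          rw [pvRepl_nil] at hpref
          exact absurd (List.prefix_nil.mp hpref) hxne
        | cons c t =>
          rw [pvRepl_skip old new c t hm] at hpref
          cases x with
          | nil => exact absurd rfl hxne
          | cons a x' =>
            rw [List.cons_prefix_cons] at hpref
            obtain ⟨rfl, hx'⟩ := hpref
            cases hx'e : x' with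
            | nil => simpa [hx'e] using List.cons_prefix_cons.mpr ⟨rfl, List.nil_prefix⟩
            | cons b y =>
              subst hx'e
              have hx's : (b :: y) <:+ p :=
                (List.suffix_cons a (b :: y)).trans hsx
              have hlen : t.length ≤ n := by
                simp only [List.length_cons] at hu; omega
              have := ih t hlen (b :: y) hx's (by simp) hx'
              exact List.cons_prefix_cons.mpr ⟨rfl, this⟩
  intro u x hsx hxne hpref
  exact H u.length u (le_refl _) x hsx hxne hpref

theorem pvPrefix_cons_iff (p : List Char) (hp : p ≠ []) (c : Char) (w : List Char) :
    p <+: c :: w ↔ p.head? = some c ∧ p.tail <+: w := by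
  cases p with
  | nil => simp at hp
  | cons a q => simp [List.cons_prefix_cons, eq_comm]

-- unfolding lemmas for pvScan
theorem pvScan_nil : pvScan [] = [] := by
  rw [pvScan]
  rw [dif_neg (by decide), dif_neg (by decide), dif_neg (by decide)]

theorem pvScan_m1 (t : List Char) : pvScan (pvP1 ++ t) = pvR1 ++ pvScan t := by
  rw [pvScan, dif_pos (List.prefix_append _ _), List.drop_left]

theorem pvScan_m2 (l : List Char) (h1 : ¬ pvP1 <+: l) (t : List Char) (hl : l = pvP2 ++ t) :
    pvScan l = pvR2 ++ pvScan t := by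
  subst hl
  rw [pvScan, dif_neg h1, dif_pos (List.prefix_append _ _), List.drop_left]

theorem pvScan_m3 (l : List Char) (h1 : ¬ pvP1 <+: l) (h2 : ¬ pvP2 <+: l)
    (t : List Char) (hl : l = pvP3 ++ t) : pvScan l = pvR3 ++ pvScan t := by
  subst hl
  rw [pvScan, dif_neg h1, dif_neg h2, dif_pos (List.prefix_append _ _), List.drop_left]

theorem pvScan_skip (c : Char) (t : List Char) (h1 : ¬ pvP1 <+: (c :: t))
    (h2 : ¬ pvP2 <+: (c :: t)) (h3 : ¬ pvP3 <+: (c :: t)) :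
    pvScan (c :: t) = c :: pvScan t := by
  rw [pvScan, dif_neg h1, dif_neg h2, dif_neg h3]

-- main: three sequential replace passes equal the single scan
theorem pvMain (s : List Char) :
    pvRepl pvP3 pvR3 (pvRepl pvP2 pvR2 (pvRepl pvP1 pvR1 s)) = pvScan s := by
  have H : ∀ (n : Nat) (s : List Char), s.length ≤ n →
      pvRepl pvP3 pvR3 (pvRepl pvP2 pvR2 (pvRepl pvP1 pvR1 s)) = pvScan s := by
    intro n
    induction n with
    | zero =>
      intro s hs
      have : s = [] := by cases s <;> simp_all
      subst this
      rw [pvRepl_nil, pvRepl_nil, pvRepl_nil, pvScan_nil]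
    | succ n ih =>
      intro s hs
      by_cases h1 : pvP1 <+: s
      · obtain ⟨t, rfl⟩ := h1
        have hlen : t.length ≤ n := by
          have : pvP1.length = 19 := by decide
          simp only [List.length_append, this] at hs; omega
        rw [pvRepl_match pvP1 pvR1 (by decide) t]
        rw [pvRepl_pass pvP2 pvR2 pvR1 (by decide)]
        rw [pvRepl_pass pvP3 pvR3 pvR1 (by decide)]
        rw [pvScan_m1, ih t hlen]
      · by_cases h2 : pvP2 <+: s
        · obtain ⟨t, hts⟩ := h2
          have hlen : t.length ≤ n := by
            have : pvP2.length = 23 := by decide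
            rw [← hts] at hs
            simp only [List.length_append, this] at hs; omega
          rw [← hts]
          rw [pvRepl_pass pvP1 pvR1 pvP2 (by decide)]
          rw [pvRepl_match pvP2 pvR2 (by decide)]
          rw [pvRepl_pass pvP3 pvR3 pvR2 (by decide)]
          rw [pvScan_m2 (pvP2 ++ t) (hts ▸ h1) t rfl, ih t hlen]
        · by_cases h3 : pvP3 <+: s
          · obtain ⟨t, hts⟩ := h3
            have hlen : t.length ≤ n := by
              have : pvP3.length = 21 := by decide
              rw [← hts] at hs
              simp only [List.length_append, this] at hs; omega
            rw [← hts]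
            rw [pvRepl_pass pvP1 pvR1 pvP3 (by decide)]
            rw [pvRepl_pass pvP2 pvR2 pvP3 (by decide)]
            rw [pvRepl_match pvP3 pvR3 (by decide)]
            rw [pvScan_m3 (pvP3 ++ t) (hts ▸ h1) (hts ▸ h2) t rfl, ih t hlen]
          · cases s with
            | nil => rw [pvRepl_nil, pvRepl_nil, pvRepl_nil, pvScan_nil]
            | cons c t =>
              have hlen : t.length ≤ n := by
                simp only [List.length_cons] at hs; omega
              rw [pvRepl_skip pvP1 pvR1 c t h1]
              have h2' : ¬ pvP2 <+: (c :: pvRepl pvP1 pvR1 t) := by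
                intro hp
                rw [pvPrefix_cons_iff pvP2 (by decide)] at hp
                obtain ⟨hh, htl⟩ := hp
                have := pvRepl_noCreate pvP1 pvR1 pvP2 (by decide) (by decide)
                  t pvP2.tail (List.tail_suffix _) (by decide) htl
                exact h2 ((pvPrefix_cons_iff pvP2 (by decide) c t).mpr ⟨hh, this⟩)
              rw [pvRepl_skip pvP2 pvR2 c _ h2']
              have h3' : ¬ pvP3 <+: (c :: pvRepl pvP2 pvR2 (pvRepl pvP1 pvR1 t)) := by
                intro hp
                rw [pvPrefix_cons_iff pvP3 (by decide)] at hp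
                obtain ⟨hh, htl⟩ := hp
                have s1 := pvRepl_noCreate pvP2 pvR2 pvP3 (by decide) (by decide)
                  (pvRepl pvP1 pvR1 t) pvP3.tail (List.tail_suffix _) (by decide) htl
                have s2 := pvRepl_noCreate pvP1 pvR1 pvP3 (by decide) (by decide)
                  t pvP3.tail (List.tail_suffix _) (by decide) s1
                exact h3 ((pvPrefix_cons_iff pvP3 (by decide) c t).mpr ⟨hh, s2⟩)
              rw [pvRepl_skip pvP3 pvR3 c _ h3']
              rw [pvScan_skip c t h1 h2 h3, ih t hlen]
  exact H s.length s (le_refl _)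

-- ===== VERDICT (by name: the statement is the Claim_ definition above) =====
theorem fix_deprecated_actions_py_spec : Claim_equal_fix_deprecated_actions_py := by
  intro content _
  unfold Spec_fix_deprecated_actions_py
  have hA : fix_deprecated_actions_py content =
      PySem.Str.replace (PySem.Str.replace (PySem.Str.replace content
        "actions/checkout@v2" "actions/checkout@v4")
        "actions/setup-python@v2" "actions/setup-python@v5")
        "actions/setup-node@v2" "actions/setup-node@v4" := rfl
  rw [hA]
  unfold fix_deprecated_actions_py_alt
  unfold PySem.Str.replace
  simp only [String.toList_ofList]
  rw [pvReplace_eq _ _ _ (by decide), pvReplace_eq _ _ _ (by decide),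
    pvReplace_eq _ _ _ (by decide)]
  have h := pvMain content.toList
  simp only [pvP1, pvP2, pvP3, pvR1, pvR2, pvR3] at h
  exact congrArg String.ofList h
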